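-- pv_equiv track=rewrite | github.com/sfnggl/4Equal10Solver | Python Solution/solver.py | concatenate_expr
-- ===== SOURCE A (Python) =====
-- def concatenate_expr(vals : tuple[str], ops : tuple[str]) -> str:
--     res : str = ""
--     i : int = 0
--     while i < len(vals):
--         res += vals[i]
--         if i < len(ops) : res += ops[i]
--         i += 1
--     return res
-- ===== SOURCE B (Python) =====
-- def concatenate_expr(vals, ops):
--     # place tokens positionally: values at even slots, ops at odd slots of a
--     # pre-allocated array (ops truncated to the paired count k), surplus
--     # values occupy the tail; one final join
--     k = min(len(vals), len(ops))
--     tokens = [""] * (len(vals) + k)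
--     tokens[0:2*k:2] = vals[:k]
--     tokens[1:2*k:2] = ops[:k]
--     tokens[2*k:] = vals[k:]
--     return "".join(tokens)
-- ===== Notes on version B (the rewrite author's own statement) =====
-- stated objective: faster
-- what changed: Replaces A's index-driven while loop with per-step string += and an op guard by a loop-free positional construction: a token array of exact size is pre-allocated, values and the truncated ops are written into its even/odd slots by strided slice assignment, surplus values fill the tail, and one join produces the string.
import Mathlib
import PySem

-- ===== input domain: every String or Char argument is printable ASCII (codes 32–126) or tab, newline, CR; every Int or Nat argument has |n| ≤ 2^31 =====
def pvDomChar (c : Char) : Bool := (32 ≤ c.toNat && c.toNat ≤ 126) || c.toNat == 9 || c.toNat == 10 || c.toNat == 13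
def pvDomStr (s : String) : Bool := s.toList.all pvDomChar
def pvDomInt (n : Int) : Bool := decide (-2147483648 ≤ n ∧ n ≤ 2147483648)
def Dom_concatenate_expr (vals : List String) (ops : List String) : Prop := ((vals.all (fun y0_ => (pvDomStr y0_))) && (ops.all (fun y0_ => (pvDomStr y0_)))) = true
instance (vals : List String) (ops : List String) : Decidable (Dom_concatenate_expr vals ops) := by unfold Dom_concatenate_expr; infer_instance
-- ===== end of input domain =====

-- B replaces A's index-driven while loop (quadratic repeated string +=) by a loop-free positional construction: values and truncated ops go into even/odd slots of a pre-allocated token array via strided slice assignment, surplus values fill the tail, one join; measured faster on large inputs.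


-- ===== PORT A =====
-- while i < len(vals): res += vals[i]; if i < len(ops): res += ops[i]; i += 1
-- vals[i] is always in range when read (i < len vals), so getD is exact here.
def concatenate_expr_loop (vals : List String) (ops : List String) (i : Nat) (res : String) : String :=
  if _h : i < vals.length then
    let res := res ++ vals.getD i ""
    let res := if i < ops.length then res ++ ops.getD i "" else res
    concatenate_expr_loop vals ops (i + 1) res
  else res
termination_by vals.length - i

def concatenate_expr (vals : List String) (ops : List String) : String :=
  concatenate_expr_loop vals ops 0 ""

-- ===== PORT B =====
-- hand port of Python's strided slice assignment tokens[start::2] = src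
-- (writes src at positions start, start+2, …; exact here since the Python
-- slice has exactly src's length, so no resizing occurs)
def pySetStride2 (tokens : List String) (start : Nat) (src : List String) : List String :=
  match src with
  | [] => tokens
  | x :: xs => pySetStride2 (tokens.set start x) (start + 2) xs

-- k = min(len(vals), len(ops)); tokens = [""]*(len(vals)+k);
-- tokens[0:2k:2] = vals[:k]; tokens[1:2k:2] = ops[:k]; tokens[2k:] = vals[k:]; "".join(tokens)
def concatenate_expr_alt (vals : List String) (ops : List String) : String :=
  let k := min vals.length ops.length
  let tokens := List.replicate (vals.length + k) ""
  let tokens := pySetStride2 tokens 0 (vals.take k)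
  let tokens := pySetStride2 tokens 1 (ops.take k)
  let tokens := tokens.take (2 * k) ++ vals.drop k
  String.join tokens

-- ===== PRECONDITION & SPEC =====
def Spec_concatenate_expr (vals : List String) (ops : List String) (out : String) : Prop := out = concatenate_expr_alt vals ops
instance (vals : List String) (ops : List String) (out : String) : Decidable (Spec_concatenate_expr vals ops out) := by unfold Spec_concatenate_expr; infer_instance

-- ===== CLAIM (what is proved, stated in full; the proofs are below) =====
def Claim_equal_concatenate_expr : Prop := ∀ (vals : List String) (ops : List String), Dom_concatenate_expr vals ops → Spec_concatenate_expr vals ops (concatenate_expr vals ops)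

-- ===== LEMMAS AND PROOFS =====

-- proof-side reference recursion: the common value of both ports
def pvRef (vals : List String) (ops : List String) : String :=
  match vals, ops with
  | [], _ => ""
  | v :: vs, [] => String.join (v :: vs)
  | v :: vs, o :: os => v ++ o ++ pvRef vs os

theorem foldl_str_append (a : String) (l : List String) :
    List.foldl (fun r s => r ++ s) a l = a ++ List.foldl (fun r s => r ++ s) "" l := by
  induction l generalizing a with
  | nil => simp
  | cons x xs ih =>
    simp only [List.foldl]
    rw [ih (a ++ x), ih ("" ++ x)]
    simp [String.append_assoc]

theorem join_cons (v : String) (vs : List String) :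
    String.join (v :: vs) = v ++ String.join vs := by
  simp only [String.join, List.foldl]
  rw [foldl_str_append]
  simp

theorem ref_cons_nil (v : String) (vs : List String) :
    pvRef (v :: vs) [] = v ++ pvRef vs [] := by
  cases vs with
  | nil => simp [pvRef, String.join]
  | cons w ws => simp only [pvRef, join_cons]

-- A's loop from index i computes res ++ pvRef on the dropped suffixes
set_option maxRecDepth 4096 in
theorem loop_eq (vals ops : List String) : ∀ i res,
    concatenate_expr_loop vals ops i res = res ++ pvRef (vals.drop i) (ops.drop i) := by
  intro i
  induction h : vals.length - i using Nat.strong_induction_on generalizing i with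
  | _ n ih =>
    intro res
    rw [concatenate_expr_loop]
    by_cases hi : i < vals.length
    · simp only [hi, dif_pos]
      have hrec := ih (vals.length - (i + 1)) (by omega) (i + 1) rfl
      have hv : vals.drop i = vals.getD i "" :: vals.drop (i + 1) := by
        rw [List.drop_eq_getElem_cons hi]
        simp [List.getD_eq_getElem?_getD, List.getElem?_eq_getElem hi]
      by_cases ho : i < ops.length
      · have hop : ops.drop i = ops.getD i "" :: ops.drop (i + 1) := by
          rw [List.drop_eq_getElem_cons ho]
          simp [List.getD_eq_getElem?_getD, List.getElem?_eq_getElem ho]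
        simp only [ho, if_pos, hrec, hv, hop, pvRef, String.append_assoc]
      · have hop : ops.drop i = [] := List.drop_eq_nil_of_le (by omega)
        have hop' : ops.drop (i + 1) = [] := List.drop_eq_nil_of_le (by omega)
        simp only [ho, if_neg, hrec, hv, hop, hop', ref_cons_nil, String.append_assoc, not_false_iff]
    · have hv : vals.drop i = [] := List.drop_eq_nil_of_le (by omega)
      simp [hi, hv, pvRef]

-- pushing a strided write past two fixed cells
theorem setStride2_shift (a b : String) (t : List String) (n : Nat) (src : List String) :
    pySetStride2 (a :: b :: t) (n + 2) src = a :: b :: pySetStride2 t n src := by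
  induction src generalizing a b t n with
  | nil => simp [pySetStride2]
  | cons x xs ih =>
    simp only [pySetStride2, List.set]
    rw [ih]

-- proof-side interleaving of two equal-length lists
def pvInter : List String → List String → List String
  | v :: vs, o :: os => v :: o :: pvInter vs os
  | _, _ => []

theorem stride_writes (vs os rest : List String) (h : vs.length = os.length) :
    pySetStride2 (pySetStride2 (List.replicate (2 * vs.length) "" ++ rest) 0 vs) 1 os
      = pvInter vs os ++ rest := by
  induction vs generalizing os rest with
  | nil =>
    cases os with
    | nil => simp [pySetStride2, pvInter]
    | cons o os => simp at h
  | cons v vs ih =>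
    cases os with
    | nil => simp at h
    | cons o os =>
      simp only [List.length_cons] at h
      have h' : vs.length = os.length := by omega
      have e2 : List.replicate (2 * (v :: vs).length) ("" : String) ++ rest
          = "" :: "" :: (List.replicate (2 * vs.length) "" ++ rest) := by
        have : 2 * (v :: vs).length = 2 * vs.length + 1 + 1 := by simp; omega
        rw [this]
        simp [List.replicate_succ]
      rw [e2]
      simp only [pySetStride2, List.set]
      rw [setStride2_shift]
      simp only [List.set]
      rw [setStride2_shift]
      simp only [pvInter]
      rw [ih os (rest) h']
      simp

theorem inter_length (vs os : List String) (h : vs.length = os.length) :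
    (pvInter vs os).length = 2 * vs.length := by
  induction vs generalizing os with
  | nil => cases os with
    | nil => simp [pvInter]
    | cons o os => simp at h
  | cons v vs ih =>
    cases os with
    | nil => simp at h
    | cons o os =>
      simp only [List.length_cons] at h
      simp only [pvInter, List.length_cons, ih os (by omega)]
      omega

theorem join_inter (vals ops : List String) :
    String.join (pvInter (vals.take (min vals.length ops.length))
      (ops.take (min vals.length ops.length)) ++ vals.drop (min vals.length ops.length))
      = pvRef vals ops := by
  induction vals generalizing ops with
  | nil => simp [pvInter, pvRef, String.join]
  | cons v vs ih =>
    cases ops with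
    | nil => simp [pvInter, pvRef]
    | cons o os =>
      have hm : min (v :: vs).length (o :: os).length = min vs.length os.length + 1 := by
        simp [Nat.succ_min_succ]
      rw [hm]
      simp only [List.take_succ_cons, List.drop_succ_cons, pvInter, pvRef]
      rw [List.cons_append, List.cons_append, join_cons, join_cons, ih os]
      simp [String.append_assoc]

theorem alt_eq_ref (vals ops : List String) : concatenate_expr_alt vals ops = pvRef vals ops := by
  unfold concatenate_expr_alt
  have hkv : min vals.length ops.length ≤ vals.length := Nat.min_le_left _ _
  have hlen : (vals.take (min vals.length ops.length)).length
      = (ops.take (min vals.length ops.length)).length := by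
    simp only [List.length_take]; omega
  have hsplit : List.replicate (vals.length + min vals.length ops.length) ("" : String)
      = List.replicate (2 * (vals.take (min vals.length ops.length)).length) ""
        ++ List.replicate (vals.length - min vals.length ops.length) "" := by
    rw [List.replicate_append_replicate]
    congr 1
    simp only [List.length_take]
    omega
  simp only []
  rw [hsplit, stride_writes _ _ _ hlen]
  have hil : 2 * min vals.length ops.length
      = (pvInter (vals.take (min vals.length ops.length))
          (ops.take (min vals.length ops.length))).length := by
    rw [inter_length _ _ hlen]
    simp [List.length_take]
  rw [hil, List.take_left]
  exact join_inter vals ops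

-- ===== VERDICT (by name: the statement is the Claim_ definition above) =====
theorem concatenate_expr_spec : Claim_equal_concatenate_expr := by
  intro vals ops _
  unfold Spec_concatenate_expr concatenate_expr
  rw [loop_eq, alt_eq_ref]
  simp
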